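-- pv_equiv track=rewrite | github.com/tr0up2r/coding-test | website/programmers/level3/185_number_game.py | solution
-- ===== SOURCE A (Python) =====
-- def solution(A, B):
--     answer = 0
--
--     A.sort(reverse=True)
--     B.sort(reverse=True)
--
--     while A:
--         if A[0] < B[0]:
--             answer += 1
--             A.pop(0)
--             B.pop(0)
--         else:
--             A.pop(0)
--
--     return answer
-- ===== SOURCE B (Python) =====
-- def solution(A, B):
--     sa = sorted(A, reverse=True)
--     sb = sorted(B, reverse=True)
--     j = 0
--     answer = 0
--     for a in sa:
--         if j < len(sb) and a < sb[j]:
--             answer += 1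
--             j += 1
--     return answer
-- ===== Notes on version B (the rewrite author's own statement) =====
-- stated objective: faster
-- what changed: Replaced the destructive while-loop with pop(0) (each pop is O(n)) by a single for-pass over the descending-sorted A with an index pointer into the descending-sorted B; B also no longer mutates its arguments.
-- outside the precondition, e.g. on solution([5, 4], [1]): A returns 0, B returns 0
import Mathlib
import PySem

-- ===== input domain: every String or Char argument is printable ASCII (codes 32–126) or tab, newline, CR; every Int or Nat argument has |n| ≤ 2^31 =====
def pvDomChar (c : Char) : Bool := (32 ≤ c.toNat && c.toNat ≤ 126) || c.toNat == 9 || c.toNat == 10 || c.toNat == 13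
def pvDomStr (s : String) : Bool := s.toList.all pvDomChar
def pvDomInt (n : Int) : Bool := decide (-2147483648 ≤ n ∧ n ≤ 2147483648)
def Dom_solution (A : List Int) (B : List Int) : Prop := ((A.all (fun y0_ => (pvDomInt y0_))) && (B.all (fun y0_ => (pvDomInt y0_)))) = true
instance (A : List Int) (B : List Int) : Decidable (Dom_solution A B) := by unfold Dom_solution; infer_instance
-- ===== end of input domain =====

-- B replaces A's destructive while-loop with pop(0) by one pass over sorted A with an
-- index pointer into sorted B (O(n log n) vs O(n^2)); note A sorts/pops its arguments in
-- place while B does not — the equivalence proved here is about the return value only.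


-- ===== PORT A =====
-- the while-loop: while A: if A[0] < B[0] (raises IndexError when B is empty → none) …
def solLoopA : List Int → List Int → Int → Option Int
  | [], _, ans => some ans
  | _ :: _, [], _ => none
  | a :: as, b :: bs, ans =>
      if a < b then solLoopA as bs (ans + 1) else solLoopA as (b :: bs) ans
  termination_by as _ _ => as.length

def solution (A : List Int) (B : List Int) : Int :=
  match solLoopA (PySem.List.sorted A (fun x => x) true) (PySem.List.sorted B (fun x => x) true) 0 with
  | some v => v
  | none => 0   -- unreachable under Pre_solution (Python raises IndexError here)

-- ===== PORT B =====
-- loop body: if j < len(sb) and a < sb[j] — j stays ≥ 0, so pyGet? sb j = none iff j ≥ len(sb)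
def altStep (sb : List Int) (st : Int × Int) (a : Int) : Int × Int :=
  match PySem.List.pyGet? sb st.1 with
  | some b => if a < b then (st.1 + 1, st.2 + 1) else st
  | none => st

def solution_alt (A : List Int) (B : List Int) : Int :=
  ((PySem.List.sorted A (fun x => x) true).foldl
      (altStep (PySem.List.sorted B (fun x => x) true)) (0, 0)).2

-- ===== PRECONDITION & SPEC =====
-- Pre_ excludes inputs with len(A) > len(B) (the source problem guarantees equal lengths):
-- there A can exhaust B and raise IndexError at B[0]; on such inputs where A happens to
-- return anyway, B computes the same value, so the exclusion is only about the possible crash.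
def Pre_solution (A : List Int) (B : List Int) : Prop := A.length ≤ B.length
instance (A : List Int) (B : List Int) : Decidable (Pre_solution A B) := by unfold Pre_solution; infer_instance
def pvWitness_solution : List Int × List Int := ([3, 1, 2], [2, 4, 1])
def Spec_solution (A : List Int) (B : List Int) (out : Int) : Prop := out = solution_alt A B
instance (A : List Int) (B : List Int) (out : Int) : Decidable (Spec_solution A B out) := by unfold Spec_solution; infer_instance

-- ===== CLAIM (what is proved, stated in full; the proofs are below) =====
def Claim_equal_solution : Prop := ∀ (A : List Int) (B : List Int), Dom_solution A B → Pre_solution A B → Spec_solution A B (solution A B)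

-- ===== LEMMAS AND PROOFS =====

lemma loopA_eq_foldl (as : List Int) : ∀ (sb : List Int) (j : Nat) (ans : Int),
    as.length + j ≤ sb.length →
    solLoopA as (sb.drop j) ans = some ((as.foldl (altStep sb) ((j : Int), ans)).2) := by
  induction as with
  | nil => intro sb j ans _; simp [solLoopA]
  | cons a as ih =>
    intro sb j ans hlen
    have hj : j < sb.length := by simp at hlen; omega
    have hdrop : sb.drop j = sb[j] :: sb.drop (j + 1) := List.drop_eq_getElem_cons hj
    have hget : PySem.List.pyGet? sb ((j : Nat) : Int) = some sb[j] := by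
      simp [PySem.List.pyGet?_natCast, List.getElem?_eq_getElem hj]
    rw [hdrop]
    by_cases hab : a < sb[j]
    · have hrec := ih sb (j + 1) (ans + 1) (by simp at hlen ⊢; omega)
      simp only [solLoopA, List.foldl_cons, altStep, hget, if_pos hab]
      rw [hrec]
      norm_num
    · have hrec := ih sb j ans (by simp at hlen ⊢; omega)
      rw [hdrop] at hrec
      simp only [solLoopA, List.foldl_cons, altStep, hget, if_neg hab, hrec]

-- ===== VERDICT (by name: the statement is the Claim_ definition above) =====
theorem solution_spec : Claim_equal_solution := by
  intro A B _ hpre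
  unfold Spec_solution solution solution_alt
  have hlen : (PySem.List.sorted A (fun x => x) true).length + 0 ≤
      (PySem.List.sorted B (fun x => x) true).length := by
    simpa [PySem.List.length_sorted] using hpre
  have h := loopA_eq_foldl (PySem.List.sorted A (fun x => x) true)
      (PySem.List.sorted B (fun x => x) true) 0 0 hlen
  simp only [List.drop_zero, Nat.cast_zero] at h
  rw [h]
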